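-- pv_equiv track=rewrite | github.com/marcimarc1/SearchandCSP | Practical 1 Part 1 example_solution-20171209/ladders.py | BuildingMatrix
-- ===== SOURCE A (Python) =====
-- import collections
-- import string
--
-- def compare(string1, string2):
--     '''Returns if the word has the same letters (not necessarily the same sequence'''
--     return (collections.Counter(string1) == collections.Counter(string2))
--
-- def BuildingMatrix(WordList):
--     WordMatrix = {}
--     Alphabet = string.ascii_lowercase
--     for words in WordList:
--         WordMatrix[words] = ([])
--         for characters in Alphabet:  # check addition
--             for change in WordList:
--                 if compare(words + characters, change):
--                     WordMatrix[words].append(change)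
--                     break
--
--     return WordMatrix
-- ===== SOURCE B (Python) =====
-- import string
--
-- def BuildingMatrix(WordList):
--     # Index each word by its sorted-letter signature, keeping the FIRST word
--     # of each signature (matching A's `break` on the first Counter-equal word).
--     index = {}
--     for w in WordList:
--         index.setdefault(''.join(sorted(w)), w)
--     WordMatrix = {}
--     for w in WordList:
--         neighbours = []
--         for c in string.ascii_lowercase:
--             m = index.get(''.join(sorted(w + c)))
--             if m is not None:
--                 neighbours.append(m)
--         WordMatrix[w] = neighbours
--     return WordMatrix
-- ===== Notes on version B (the rewrite author's own statement) =====
-- stated objective: faster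
-- what changed: Instead of scanning the whole word list for a Counter-equal word for each (word, letter) pair, B builds a hash index from sorted-letter signature to the first word bearing it once, and answers each (word, letter) query by a single dictionary lookup.
import Mathlib
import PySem

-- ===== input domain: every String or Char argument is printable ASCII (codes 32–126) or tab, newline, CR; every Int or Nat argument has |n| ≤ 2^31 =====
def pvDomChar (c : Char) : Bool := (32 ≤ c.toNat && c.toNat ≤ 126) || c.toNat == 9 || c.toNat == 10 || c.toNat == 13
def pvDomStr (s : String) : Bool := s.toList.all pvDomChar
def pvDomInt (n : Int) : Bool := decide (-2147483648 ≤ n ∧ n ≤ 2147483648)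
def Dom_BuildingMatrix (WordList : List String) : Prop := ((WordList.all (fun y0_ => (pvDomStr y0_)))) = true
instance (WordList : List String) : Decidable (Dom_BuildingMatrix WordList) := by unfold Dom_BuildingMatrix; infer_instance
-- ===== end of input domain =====

-- B replaces A's per-(word,letter) scan of the whole word list by a one-time index
-- keyed by sorted-letter signature; same return value with asymptotically fewer comparisons.

-- ===== PORT A =====

-- compare(s1, s2): Counter(s1) == Counter(s2) holds exactly when the character multisets agree (Perm); exact.
def pyCompare (s1 s2 : String) : Bool := decide (s1.toList.Perm s2.toList)

-- string.ascii_lowercase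
def pyAlphabet : List Char := "abcdefghijklmnopqrstuvwxyz".toList

-- 'for change in WordList: if compare(words+characters, change): WordMatrix[words].append(change); break'
-- (the break-on-first-match loop is List.find?; the append is Dict.modify at the key)
def BuildingMatrix (WordList : List String) : List (String × List String) :=
  (WordList.foldl (fun (wm : PySem.Dict String (List String)) words =>
      pyAlphabet.foldl (fun wm characters =>
          match WordList.find? (fun change => pyCompare (String.ofList (words.toList ++ [characters])) change) with
          | some change => wm.modify words [] (· ++ [change])
          | none => wm)
        (wm.insert words []))
    PySem.Dict.empty).items

-- ===== PORT B =====

-- ''.join(sorted(w)) ported as the sorted character list (the join is a bijective re-packaging of the key).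
def pySig (s : String) : List Char := PySem.List.sorted s.toList (fun x => x) false

-- index = {}; for w in WordList: index.setdefault(sig(w), w)
def pyIndex (WordList : List String) : PySem.Dict (List Char) String :=
  WordList.foldl (fun d w => d.setdefault (pySig w) w) PySem.Dict.empty

def BuildingMatrix_alt (WordList : List String) : List (String × List String) :=
  (WordList.foldl (fun (wm : PySem.Dict String (List String)) w =>
      wm.insert w
        (pyAlphabet.foldl (fun neighbours c =>
            match (pyIndex WordList).get? (pySig (String.ofList (w.toList ++ [c]))) with
            | some m => neighbours ++ [m]
            | none => neighbours)
          []))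
    PySem.Dict.empty).items

-- ===== PRECONDITION & SPEC =====
def Spec_BuildingMatrix (WordList : List String) (out : List (String × List String)) : Prop := out = BuildingMatrix_alt WordList
instance (WordList : List String) (out : List (String × List String)) : Decidable (Spec_BuildingMatrix WordList out) := by unfold Spec_BuildingMatrix; infer_instance

-- ===== CLAIM (what is proved, stated in full; the proofs are below) =====
def Claim_equal_BuildingMatrix : Prop := ∀ (WordList : List String), Dom_BuildingMatrix WordList → Spec_BuildingMatrix WordList (BuildingMatrix WordList)

-- ===== LEMMAS AND PROOFS =====

theorem pv_find?_congr {α : Type} (l : List α) (p q : α → Bool) (h : ∀ x, p x = q x) :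
    l.find? p = l.find? q := by
  induction l with
  | nil => rfl
  | cons x t ih => simp only [List.find?_cons, h x]; cases q x <;> simp [ih]

-- A's test and B's key agree: Counter equality is equality of sorted signatures.
theorem pyCompare_eq_sig (t change : String) :
    pyCompare t change = (pySig change == pySig t) := by
  have hiff : t.toList.Perm change.toList ↔ pySig change = pySig t := by
    rw [pySig, pySig, PySem.List.sorted_id_eq_sorted_id_iff_perm]
    exact List.perm_comm
  simp only [pyCompare, hiff]
  rw [beq_eq_decide]

-- The setdefault-built index answers: the first element whose signature is k.
theorem get?_foldl_setdefault (wl : List String) (d : PySem.Dict (List Char) String) (k : List Char) :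
    (wl.foldl (fun d w => d.setdefault (pySig w) w) d).get? k
      = match d.get? k with
        | some v => some v
        | none => wl.find? (fun w => pySig w == k) := by
  induction wl generalizing d with
  | nil => cases h : d.get? k <;> simp [h]
  | cons w rest ih =>
    simp only [List.foldl_cons, List.find?_cons]
    by_cases hc : d.contains (pySig w) = true
    · rw [PySem.Dict.setdefault_of_contains d w hc, ih]
      by_cases hk : (pySig w == k) = true
      · have hkk : pySig w = k := eq_of_beq hk
        subst hkk
        rw [PySem.Dict.contains_eq_isSome_get?] at hc
        cases h : d.get? (pySig w) with
        | some v => simp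
        | none => simp [h] at hc
      · simp [hk]
    · rw [PySem.Dict.setdefault_of_not_contains d w (by simpa using hc), ih]
      by_cases hk : (pySig w == k) = true
      · have hkk : pySig w = k := eq_of_beq hk
        subst hkk
        have hnone : d.get? (pySig w) = none := by
          rw [PySem.Dict.contains_eq_isSome_get?] at hc
          cases h : d.get? (pySig w) <;> simp [h] at hc ⊢
        rw [hnone, PySem.Dict.get?_insert_self]
        simp
      · have hne : k ≠ pySig w := fun h => hk (by simp [h])
        rw [PySem.Dict.get?_insert_of_ne _ _ hne]
        simp [hk]

theorem get?_pyIndex (wl : List String) (k : List Char) :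
    (pyIndex wl).get? k = wl.find? (fun w => pySig w == k) := by
  rw [pyIndex, get?_foldl_setdefault, PySem.Dict.get?_empty]

-- On each (word, letter) query A's scan and B's lookup return the same word.
theorem find?_eq_lookup (wl : List String) (t : String) :
    wl.find? (fun change => pyCompare t change) = (pyIndex wl).get? (pySig t) := by
  rw [get?_pyIndex]
  exact pv_find?_congr wl _ _ (fun change => pyCompare_eq_sig t change)

-- A's inner loop (append to WordMatrix[words] on each hit) is one insert of the collected list.
theorem foldl_modify_insert (g : Char → Option String) (l : List Char)
    (wm : PySem.Dict String (List String)) (w : String) (v : List String) :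
    (l.foldl (fun wm c =>
        match g c with
        | some m => wm.modify w [] (· ++ [m])
        | none => wm) (wm.insert w v))
      = wm.insert w
          (l.foldl (fun acc c =>
            match g c with
            | some m => acc ++ [m]
            | none => acc) v) := by
  induction l generalizing v with
  | nil => rfl
  | cons c rest ih =>
    simp only [List.foldl_cons]
    cases g c with
    | none => exact ih v
    | some m =>
      have hstep : (wm.insert w v).modify w [] (· ++ [m]) = wm.insert w (v ++ [m]) := by
        show ((wm.insert w v).insert w (((wm.insert w v).getD w []) ++ [m])) = _
        rw [PySem.Dict.getD_insert_self, PySem.Dict.insert_insert_self]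
      simp only [hstep]
      exact ih (v ++ [m])

theorem BuildingMatrix_eq_alt (wl : List String) :
    BuildingMatrix wl = BuildingMatrix_alt wl := by
  unfold BuildingMatrix BuildingMatrix_alt
  congr 1
  apply PySem.List.foldl_congr_mem
  intro wm w _
  rw [foldl_modify_insert (fun c => wl.find? (fun change => pyCompare (String.ofList (w.toList ++ [c])) change))]
  congr 1
  apply PySem.List.foldl_congr_mem
  intro acc c _
  rw [find?_eq_lookup]

-- ===== VERDICT (by name: the statement is the Claim_ definition above) =====
theorem BuildingMatrix_spec : Claim_equal_BuildingMatrix := by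
  intro wl _
  exact BuildingMatrix_eq_alt wl
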